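-- pv_equiv track=rewrite | github.com/cryptomentor139-cell/cryptomentor-bot | Bismillah/menu_handlers.py | get_rewards_display
-- ===== SOURCE A (Python) =====
-- def get_rewards_display(tier_level, total_referrals):
--     """Display unlocked rewards"""
--     rewards = []
--
--     if tier_level >= 1:
--         rewards.append("✅ 5 credits per free referral")
--     if tier_level >= 2:
--         rewards.append("✅ 10% bonus credits")
--         rewards.append("✅ Bronze badge & community access")
--     if tier_level >= 3:
--         rewards.append("✅ 15% bonus credits")
--         rewards.append("✅ Early access to features")
--     if tier_level >= 4:
--         rewards.append("✅ 20% bonus credits")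
--         rewards.append("✅ VIP support channel")
--     if tier_level >= 5:
--         rewards.append("✅ 30% bonus credits")
--         rewards.append("✅ Direct admin access")
--
--     # Milestone rewards
--     milestones = [
--         (5, "🎁 50 bonus credits"),
--         (15, "🎁 100 bonus credits + 1 day premium"),
--         (30, "🎁 1 week premium trial"),
--         (75, "🎁 1 month premium"),
--     ]
--
--     for milestone, reward in milestones:
--         if total_referrals >= milestone:
--             rewards.append(f"✅ {reward}")
--
--     return "\n".join(rewards) if rewards else "🔒 Complete first referral to unlock rewards"
-- ===== SOURCE B (Python) =====
-- def get_rewards_display(tier_level, total_referrals):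
--     """Display unlocked rewards (closed-form count + flat-table slicing)."""
--     TIER_REWARDS = [
--         "\u2705 5 credits per free referral",
--         "\u2705 10% bonus credits",
--         "\u2705 Bronze badge & community access",
--         "\u2705 15% bonus credits",
--         "\u2705 Early access to features",
--         "\u2705 20% bonus credits",
--         "\u2705 VIP support channel",
--         "\u2705 30% bonus credits",
--         "\u2705 Direct admin access",
--     ]
--     MILESTONE_REWARDS = [
--         "\u2705 \U0001F381 50 bonus credits",
--         "\u2705 \U0001F381 100 bonus credits + 1 day premium",
--         "\u2705 \U0001F381 1 week premium trial",
--         "\u2705 \U0001F381 1 month premium",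
--     ]
--     THRESHOLDS = [5, 15, 30, 75]
--     # tier k unlocks 2k-1 reward lines cumulatively (1,3,5,7,9), clamped to [0,9]
--     n_tiers = max(0, 2 * min(tier_level, 5) - 1)
--     # binary search: number of milestone thresholds <= total_referrals
--     lo, hi = 0, len(THRESHOLDS)
--     while lo < hi:
--         mid = (lo + hi) // 2
--         if total_referrals >= THRESHOLDS[mid]:
--             lo = mid + 1
--         else:
--             hi = mid
--     return "\n".join(TIER_REWARDS[:n_tiers] + MILESTONE_REWARDS[:lo]) \
--         or "\U0001F512 Complete first referral to unlock rewards"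
-- ===== Notes on version B (the rewrite author's own statement) =====
-- stated objective: alternative
-- what changed: Replaces conditional appends with closed-form counting: the number of unlocked tier lines is computed as max(0, 2*min(tier,5)-1) and the milestone count by binary search over the threshold list, then the result is sliced from two flat reward tables.
import Mathlib
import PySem

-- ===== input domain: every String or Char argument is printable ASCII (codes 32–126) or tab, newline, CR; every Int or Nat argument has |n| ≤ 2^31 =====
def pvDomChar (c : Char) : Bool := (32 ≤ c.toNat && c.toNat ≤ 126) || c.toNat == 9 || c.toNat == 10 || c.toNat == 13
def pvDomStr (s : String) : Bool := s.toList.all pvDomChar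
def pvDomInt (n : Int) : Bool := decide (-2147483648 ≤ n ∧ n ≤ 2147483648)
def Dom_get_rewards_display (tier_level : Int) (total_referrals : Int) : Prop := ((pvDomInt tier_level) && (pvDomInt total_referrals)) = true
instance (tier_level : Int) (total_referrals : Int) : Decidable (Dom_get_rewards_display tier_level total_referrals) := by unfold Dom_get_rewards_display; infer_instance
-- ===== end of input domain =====

-- ===== PORT A =====
-- B computes unlocked counts in closed form / by binary search and slices flat reward tables (alternative decomposition; equal cost).
def get_rewards_display (tier_level : Int) (total_referrals : Int) : String :=
  let rewards : List String := []
  let rewards := if tier_level ≥ 1 then rewards ++ ["✅ 5 credits per free referral"] else rewards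
  let rewards := if tier_level ≥ 2 then rewards ++ ["✅ 10% bonus credits", "✅ Bronze badge & community access"] else rewards
  let rewards := if tier_level ≥ 3 then rewards ++ ["✅ 15% bonus credits", "✅ Early access to features"] else rewards
  let rewards := if tier_level ≥ 4 then rewards ++ ["✅ 20% bonus credits", "✅ VIP support channel"] else rewards
  let rewards := if tier_level ≥ 5 then rewards ++ ["✅ 30% bonus credits", "✅ Direct admin access"] else rewards
  let milestones : List (Int × String) := [
    (5, "🎁 50 bonus credits"),
    (15, "🎁 100 bonus credits + 1 day premium"),
    (30, "🎁 1 week premium trial"),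
    (75, "🎁 1 month premium")]
  let rewards := milestones.foldl (fun acc mr =>
    if total_referrals ≥ mr.1 then acc ++ ["✅ " ++ mr.2] else acc) rewards
  if rewards.isEmpty then "🔒 Complete first referral to unlock rewards"
  else PySem.Str.join "\n" rewards

-- ===== PORT B =====
-- while lo < hi: bisect for the number of thresholds ≤ r (indices always in range, so getD never uses its default)
def pvBisect (r : Int) (ths : List Int) (lo hi : Nat) : Nat :=
  if lo < hi then
    let mid := (lo + hi) / 2
    if r ≥ ths.getD mid 0 then pvBisect r ths (mid + 1) hi
    else pvBisect r ths lo mid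
  else lo
termination_by hi - lo

def get_rewards_display_alt (tier_level : Int) (total_referrals : Int) : String :=
  let tierRewards : List String := [
    "✅ 5 credits per free referral",
    "✅ 10% bonus credits",
    "✅ Bronze badge & community access",
    "✅ 15% bonus credits",
    "✅ Early access to features",
    "✅ 20% bonus credits",
    "✅ VIP support channel",
    "✅ 30% bonus credits",
    "✅ Direct admin access"]
  let milestoneRewards : List String := [
    "✅ 🎁 50 bonus credits",
    "✅ 🎁 100 bonus credits + 1 day premium",
    "✅ 🎁 1 week premium trial",
    "✅ 🎁 1 month premium"]
  let thresholds : List Int := [5, 15, 30, 75]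
  let nTiers : Int := max 0 (2 * min tier_level 5 - 1)
  let lo := pvBisect total_referrals thresholds 0 thresholds.length
  let s := PySem.Str.join "\n" (tierRewards.take nTiers.toNat ++ milestoneRewards.take lo)
  if s = "" then "🔒 Complete first referral to unlock rewards" else s

-- ===== PRECONDITION & SPEC =====
def Spec_get_rewards_display (tier_level : Int) (total_referrals : Int) (out : String) : Prop := out = get_rewards_display_alt tier_level total_referrals
instance (tier_level : Int) (total_referrals : Int) (out : String) : Decidable (Spec_get_rewards_display tier_level total_referrals out) := by unfold Spec_get_rewards_display; infer_instance

-- ===== CLAIM (what is proved, stated in full; the proofs are below) =====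
def Claim_equal_get_rewards_display : Prop := ∀ (tier_level : Int) (total_referrals : Int), Dom_get_rewards_display tier_level total_referrals → Spec_get_rewards_display tier_level total_referrals (get_rewards_display tier_level total_referrals)

-- ===== LEMMAS AND PROOFS =====

-- ===== VERDICT (by name: the statement is the Claim_ definition above) =====
set_option maxHeartbeats 4000000 in
set_option maxRecDepth 4000 in
theorem get_rewards_display_spec : Claim_equal_get_rewards_display := by
  intro t r _
  unfold Spec_get_rewards_display get_rewards_display get_rewards_display_alt
  by_cases h1 : t ≥ 1 <;> by_cases h2 : t ≥ 2 <;> by_cases h3 : t ≥ 3 <;>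
    by_cases h4 : t ≥ 4 <;> by_cases h5 : t ≥ 5 <;>
    by_cases m1 : r ≥ 5 <;> by_cases m2 : r ≥ 15 <;> by_cases m3 : r ≥ 30 <;> by_cases m4 : r ≥ 75 <;>
  first
    | (exfalso; omega)
    | ((first
        | have e : max 0 (2 * min t 5 - 1) = (0:Int) := by omega
        | have e : max 0 (2 * min t 5 - 1) = (1:Int) := by omega
        | have e : max 0 (2 * min t 5 - 1) = (3:Int) := by omega
        | have e : max 0 (2 * min t 5 - 1) = (5:Int) := by omega
        | have e : max 0 (2 * min t 5 - 1) = (7:Int) := by omega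
        | have e : max 0 (2 * min t 5 - 1) = (9:Int) := by omega)
       <;> simp [pvBisect, h1, h2, h3, h4, h5, m1, m2, m3, m4, e] <;> decide)
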